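-- pv_equiv track=rewrite | github.com/abhishec/purple-agent-business-process-worker | src/officeqa_tools.py | search_bulletin
-- ===== SOURCE A (Python) =====
-- MAX_BULLETIN_CHARS = 50_000
--
-- def search_bulletin(content: str, keywords: list[str], context_lines: int = 10) -> str:
--     """
--     Search bulletin content for relevant sections containing the given keywords.
--     Returns up to (context_lines * 2) lines around each match, deduped.
--
--     Used when the full bulletin is too large and we want to extract
--     only the relevant table/paragraph.
--     """
--     if not content or not keywords:
--         return content[:10_000] if content else ""  # fallback: first 10k chars
--
--     lines = content.split("\n")
--     total = len(lines)
--     relevant_line_sets: set[int] = set()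
--
--     for kw in keywords:
--         kw_lower = kw.lower()
--         for idx, line in enumerate(lines):
--             if kw_lower in line.lower():
--                 # Include surrounding context
--                 start = max(0, idx - context_lines)
--                 end   = min(total, idx + context_lines + 1)
--                 for li in range(start, end):
--                     relevant_line_sets.add(li)
--
--     if not relevant_line_sets:
--         # No keyword match — return first portion as fallback
--         return "\n".join(lines[:200])
--
--     # Sort and collect, adding "..." separators for gaps
--     sorted_idxs = sorted(relevant_line_sets)
--     chunks: list[str] = []
--     prev_end = -1
--
--     for idx in sorted_idxs:
--         if prev_end >= 0 and idx > prev_end + 1: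
--             chunks.append("...")
--         chunks.append(lines[idx])
--         prev_end = idx
--
--     result = "\n".join(chunks)
--     # Cap at MAX_BULLETIN_CHARS
--     if len(result) > MAX_BULLETIN_CHARS:
--         result = result[:MAX_BULLETIN_CHARS]
--     return result
-- ===== SOURCE B (Python) =====
-- MAX_BULLETIN_CHARS = 50_000
--
-- def search_bulletin(content: str, keywords: list[str], context_lines: int = 10) -> str:
--     if not content:
--         return ""
--     if not keywords:
--         return content[:10_000]
--
--     lines = content.split("\n")
--     total = len(lines)
--     lowered_kws = [kw.lower() for kw in keywords]
--
--     # One pass: lower each line once, merge context windows on the fly.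
--     merged: list[tuple[int, int]] = []  # disjoint, gapped, ordered [s, e) intervals
--     for idx, line in enumerate(lines):
--         low = line.lower()
--         if any(kw in low for kw in lowered_kws):
--             s = max(0, idx - context_lines)
--             e = min(total, idx + context_lines + 1)
--             if s >= e:
--                 continue
--             if merged and s <= merged[-1][1]:
--                 merged[-1] = (merged[-1][0], max(merged[-1][1], e))
--             else:
--                 merged.append((s, e))
--
--     if not merged:
--         return "\n".join(lines[:200])
--
--     chunks: list[str] = []
--     for s, e in merged:
--         if chunks:
--             chunks.append("...")
--         chunks.extend(lines[s:e])
--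
--     result = "\n".join(chunks)
--     if len(result) > MAX_BULLETIN_CHARS:
--         result = result[:MAX_BULLETIN_CHARS]
--     return result
-- ===== Notes on version B (the rewrite author's own statement) =====
-- stated objective: faster
-- what changed: A scans all lines once per keyword (lowercasing each line K times), collects covered line indices in a set and sorts it; B makes a single pass over the lines with pre-lowercased keywords, merging context windows on the fly into ordered disjoint intervals, so no index set, no sort and no repeated lowercasing.
import Mathlib
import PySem

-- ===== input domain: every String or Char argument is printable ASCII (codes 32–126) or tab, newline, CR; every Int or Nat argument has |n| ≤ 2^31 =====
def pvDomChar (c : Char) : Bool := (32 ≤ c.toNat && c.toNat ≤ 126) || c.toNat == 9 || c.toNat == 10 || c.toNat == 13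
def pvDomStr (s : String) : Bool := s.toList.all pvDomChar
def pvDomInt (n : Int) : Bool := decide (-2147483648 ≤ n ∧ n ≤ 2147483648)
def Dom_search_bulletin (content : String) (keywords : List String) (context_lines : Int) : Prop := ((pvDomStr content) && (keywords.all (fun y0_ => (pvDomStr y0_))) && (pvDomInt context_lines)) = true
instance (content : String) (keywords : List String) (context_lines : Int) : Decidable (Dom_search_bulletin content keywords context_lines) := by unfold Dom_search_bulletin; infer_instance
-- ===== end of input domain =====

-- B replaces A's per-keyword rescans plus index-set-and-sort with a single pass over the lines
-- (each line lowercased once, keywords pre-lowercased) that merges the context windows on the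
-- fly into ordered disjoint intervals; objective: faster by a constant-factor mechanism.

-- ===== PORT A =====
def sbLineMatch (kwl line : String) : Bool := PySem.Str.isIn kwl (PySem.Str.lower line)

def sbAddRange (acc : PySem.Set Int) (s e : Int) : PySem.Set Int :=
  (PySem.List.pyRange s e 1).foldl (fun st li => PySem.Set.add st li) acc

def sbRelevant (lines : List String) (keywords : List String) (c : Int) : PySem.Set Int :=
  keywords.foldl (fun acc kw =>
    let kwl := PySem.Str.lower kw
    (PySem.List.enumerate lines 0).foldl (fun acc2 p =>
      if sbLineMatch kwl p.2 then
        sbAddRange acc2 (max 0 (p.1 - c)) (min (lines.length : Int) (p.1 + c + 1))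
      else acc2) acc) PySem.Set.empty

def sbStepA (lines : List String) (st : List String × Int) (idx : Int) : List String × Int :=
  let chunks := if st.2 ≥ 0 ∧ idx > st.2 + 1 then st.1 ++ ["..."] else st.1
  (chunks ++ [PySem.List.pyGetD lines idx ""], idx)

def search_bulletin (content : String) (keywords : List String) (context_lines : Int) : String :=
  if content = "" ∨ keywords = [] then
    (if content ≠ "" then PySem.Str.slice content none (some 10000) else "")
  else
    let lines := (PySem.Str.split? content "\n").getD []
    let rel := sbRelevant lines keywords context_lines
    if rel = [] then
      PySem.Str.join "\n" (PySem.List.slice lines none (some 200))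
    else
      let sorted_idxs := PySem.List.sorted rel (fun x => x)
      let result := PySem.Str.join "\n" (sorted_idxs.foldl (sbStepA lines) ([], -1)).1
      if PySem.Str.len result > 50000 then PySem.Str.slice result none (some 50000) else result

-- ===== PORT B =====
def sbAnyKw (lkws : List String) (line : String) : Bool :=
  let low := PySem.Str.lower line
  lkws.any (fun kw => PySem.Str.isIn kw low)

def sbMerge (c total : Int) (m : List (Int × Int)) (idx : Int) : List (Int × Int) :=
  let s := max 0 (idx - c)
  let e := min total (idx + c + 1)
  if s ≥ e then m
  else match m with
    | (ps, pe) :: rest => if s ≤ pe then (ps, max pe e) :: rest else (s, e) :: (ps, pe) :: rest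
    | [] => [(s, e)]

def sbStepB (lines : List String) (ch : List String) (p : Int × Int) : List String :=
  (if ch ≠ [] then ch ++ ["..."] else ch) ++ PySem.List.slice lines (some p.1) (some p.2)

def search_bulletin_alt (content : String) (keywords : List String) (context_lines : Int) : String :=
  if content = "" then ""
  else if keywords = [] then PySem.Str.slice content none (some 10000)
  else
    let lines := (PySem.Str.split? content "\n").getD []
    let lkws := keywords.map PySem.Str.lower
    let merged := ((PySem.List.enumerate lines 0).foldl (fun m p =>
        if sbAnyKw lkws p.2 then sbMerge context_lines (lines.length : Int) m p.1 else m) []).reverse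
    if merged = [] then PySem.Str.join "\n" (PySem.List.slice lines none (some 200))
    else
      let result := PySem.Str.join "\n" (merged.foldl (sbStepB lines) [])
      if PySem.Str.len result > 50000 then PySem.Str.slice result none (some 50000) else result

-- ===== PRECONDITION & SPEC =====
def Spec_search_bulletin (content : String) (keywords : List String) (context_lines : Int) (out : String) : Prop := out = search_bulletin_alt content keywords context_lines
instance (content : String) (keywords : List String) (context_lines : Int) (out : String) : Decidable (Spec_search_bulletin content keywords context_lines out) := by unfold Spec_search_bulletin; infer_instance

-- ===== CLAIM (what is proved, stated in full; the proofs are below) =====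
def Claim_equal_search_bulletin : Prop := ∀ (content : String) (keywords : List String) (context_lines : Int), Dom_search_bulletin content keywords context_lines → Spec_search_bulletin content keywords context_lines (search_bulletin content keywords context_lines)

-- ===== LEMMAS AND PROOFS =====

-- proof-side notions: the per-line match predicate, the context window, interval lists
def sbQ (kws : List String) (line : String) : Bool :=
  kws.any (fun kw => sbLineMatch (PySem.Str.lower kw) line)

def sbCov (c total idx i : Int) : Prop := max 0 (idx - c) ≤ i ∧ i < min total (idx + c + 1)

def sbFlat (M : List (Int × Int)) : List Int := M.flatMap (fun p => PySem.List.pyRange p.1 p.2 1)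

def sbOK (total : Int) (M : List (Int × Int)) : Prop :=
  ∀ p ∈ M, 0 ≤ p.1 ∧ p.1 < p.2 ∧ p.2 ≤ total

def sbMInv (c total k : Int) (m : List (Int × Int)) : Prop :=
  sbOK total m ∧ (∀ p ∈ m, p.1 ≤ max 0 (k - c)) ∧ m.IsChain (fun a b => b.2 < a.1)

theorem sbAnyKw_eq (kws : List String) (line : String) :
    sbAnyKw (kws.map PySem.Str.lower) line = sbQ kws line := by
  simp [sbAnyKw, sbQ, sbLineMatch, List.any_map, Function.comp_def, PySem.Str.toList_lower]

theorem nodup_set_add {α : Type} [BEq α] [LawfulBEq α] (s : PySem.Set α) (x : α)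
    (h : s.Nodup) : (s.add x).Nodup := by
  unfold PySem.Set.add
  split
  · exact h
  · next hx =>
    simp_all [PySem.Set.contains, List.nodup_append]
    exact fun a ha he => hx (he ▸ ha)

theorem mem_foldl_add (r : List Int) : ∀ (acc : PySem.Set Int) (i : Int),
    i ∈ r.foldl (fun st li => PySem.Set.add st li) acc ↔ i ∈ acc ∨ i ∈ r := by
  induction r with
  | nil => simp
  | cons x t ih => intro acc i; simp [List.foldl_cons, ih, PySem.Set.mem_add]; tauto

theorem mem_addRange (acc : PySem.Set Int) (s e i : Int) :
    i ∈ sbAddRange acc s e ↔ i ∈ acc ∨ (s ≤ i ∧ i < e) := by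
  rw [sbAddRange, mem_foldl_add, PySem.List.mem_pyRange_one]

theorem nodup_foldl_add (r : List Int) : ∀ (acc : PySem.Set Int), acc.Nodup →
    (r.foldl (fun st li => PySem.Set.add st li) acc).Nodup := by
  induction r with
  | nil => exact fun _ h => h
  | cons x t ih => intro acc h; exact ih _ (nodup_set_add acc x h)

theorem nodup_addRange (acc : PySem.Set Int) (s e : Int) (h : acc.Nodup) :
    (sbAddRange acc s e).Nodup := nodup_foldl_add _ acc h

theorem mem_enumFold (kwl : String) (c total : Int) (ls : List String) : ∀ (k : Int) (acc : PySem.Set Int) (i : Int),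
    i ∈ (PySem.List.enumerate ls k).foldl (fun acc2 p =>
      if sbLineMatch kwl p.2 then sbAddRange acc2 (max 0 (p.1 - c)) (min total (p.1 + c + 1)) else acc2) acc ↔
    i ∈ acc ∨ ∃ p ∈ PySem.List.enumerate ls k, sbLineMatch kwl p.2 = true ∧ sbCov c total p.1 i := by
  induction ls with
  | nil => simp [PySem.List.enumerate]
  | cons x t ih =>
    intro k acc i
    have he : PySem.List.enumerate (x :: t) k = (k, x) :: PySem.List.enumerate t (k+1) := by
      simp [PySem.List.enumerate]
    rw [he]
    simp only [List.foldl_cons, ih, List.mem_cons]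
    by_cases hm : sbLineMatch kwl x = true
    · simp only [hm, if_true, mem_addRange, sbCov]
      constructor
      · rintro ((h | h) | ⟨p, hp, h1, h2⟩)
        · exact Or.inl h
        · exact Or.inr ⟨(k, x), Or.inl rfl, hm, h⟩
        · exact Or.inr ⟨p, Or.inr hp, h1, h2⟩
      · rintro (h | ⟨p, (rfl | hp), h1, h2⟩)
        · exact Or.inl (Or.inl h)
        · exact Or.inl (Or.inr h2)
        · exact Or.inr ⟨p, hp, h1, h2⟩
    · simp only [hm, Bool.false_eq_true, if_false]
      constructor
      · rintro (h | ⟨p, hp, h1, h2⟩)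
        · exact Or.inl h
        · exact Or.inr ⟨p, Or.inr hp, h1, h2⟩
      · rintro (h | ⟨p, (hpe | hp), h1, h2⟩)
        · exact Or.inl h
        · subst hpe; exact absurd h1 hm
        · exact Or.inr ⟨p, hp, h1, h2⟩

theorem mem_rel (lines kws : List String) (c i : Int) :
    i ∈ sbRelevant lines kws c ↔
      ∃ p ∈ PySem.List.enumerate lines 0, sbQ kws p.2 = true ∧ sbCov c (lines.length : Int) p.1 i := by
  rw [sbRelevant]
  have outer : ∀ (ks : List String) (acc : PySem.Set Int),
      i ∈ ks.foldl (fun acc kw =>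
        (PySem.List.enumerate lines 0).foldl (fun acc2 p =>
          if sbLineMatch (PySem.Str.lower kw) p.2 then
            sbAddRange acc2 (max 0 (p.1 - c)) (min (lines.length : Int) (p.1 + c + 1))
          else acc2) acc) acc ↔
      i ∈ acc ∨ ∃ kw ∈ ks, ∃ p ∈ PySem.List.enumerate lines 0,
        sbLineMatch (PySem.Str.lower kw) p.2 = true ∧ sbCov c (lines.length : Int) p.1 i := by
    intro ks
    induction ks with
    | nil => simp
    | cons w t ih =>
      intro acc
      simp only [List.foldl_cons, ih, mem_enumFold, List.mem_cons]
      constructor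
      · rintro ((h | ⟨p, hp, h1, h2⟩) | ⟨kw, hkw, hrest⟩)
        · exact Or.inl h
        · exact Or.inr ⟨w, Or.inl rfl, p, hp, h1, h2⟩
        · exact Or.inr ⟨kw, Or.inr hkw, hrest⟩
      · rintro (h | ⟨kw, (rfl | hkw), hrest⟩)
        · exact Or.inl (Or.inl h)
        · exact Or.inl (Or.inr hrest)
        · exact Or.inr ⟨kw, hkw, hrest⟩
  rw [outer]
  simp only [PySem.Set.empty, List.not_mem_nil, false_or, sbQ, List.any_eq_true]
  constructor
  · rintro ⟨kw, hkw, p, hp, h1, h2⟩; exact ⟨p, hp, ⟨kw, hkw, h1⟩, h2⟩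
  · rintro ⟨p, hp, ⟨kw, hkw, h1⟩, h2⟩; exact ⟨kw, hkw, p, hp, h1, h2⟩

theorem nodup_rel (lines kws : List String) (c : Int) : (sbRelevant lines kws c).Nodup := by
  rw [sbRelevant]
  have inner : ∀ (kwl : String) (ls : List String) (k : Int) (acc : PySem.Set Int), acc.Nodup →
      ((PySem.List.enumerate ls k).foldl (fun acc2 p =>
        if sbLineMatch kwl p.2 then sbAddRange acc2 (max 0 (p.1 - c)) (min (lines.length : Int) (p.1 + c + 1)) else acc2) acc).Nodup := by
    intro kwl ls
    induction ls with
    | nil => intro k acc h; simpa [PySem.List.enumerate] using h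
    | cons x t ih =>
      intro k acc h
      have he : PySem.List.enumerate (x :: t) k = (k, x) :: PySem.List.enumerate t (k+1) := by
        simp [PySem.List.enumerate]
      rw [he]
      simp only [List.foldl_cons]
      apply ih
      split
      · exact nodup_addRange _ _ _ h
      · exact h
  have outer : ∀ (ks : List String) (acc : PySem.Set Int), acc.Nodup →
      (ks.foldl (fun acc kw =>
        (PySem.List.enumerate lines 0).foldl (fun acc2 p =>
          if sbLineMatch (PySem.Str.lower kw) p.2 then
            sbAddRange acc2 (max 0 (p.1 - c)) (min (lines.length : Int) (p.1 + c + 1))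
          else acc2) acc) acc).Nodup := by
    intro ks
    induction ks with
    | nil => exact fun _ h => h
    | cons w t ih => intro acc h; exact ih _ (inner _ _ _ _ h)
  exact outer kws _ List.nodup_nil

theorem mem_flat (M : List (Int × Int)) (i : Int) :
    i ∈ sbFlat M ↔ ∃ p ∈ M, p.1 ≤ i ∧ i < p.2 := by
  simp [sbFlat, List.mem_flatMap, PySem.List.mem_pyRange_one]

theorem minv_mono (c total k k' : Int) (m : List (Int × Int)) (h : sbMInv c total k m) (hk : k ≤ k') :
    sbMInv c total k' m :=
  ⟨h.1, fun p hp => le_trans (h.2.1 p hp) (by omega), h.2.2⟩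

theorem sbMerge_skip (c total k : Int) (m : List (Int × Int)) (h : max 0 (k - c) ≥ min total (k + c + 1)) :
    sbMerge c total m k = m := by
  rw [sbMerge.eq_def]; dsimp only; rw [if_pos h]

theorem sbMerge_nil (c total k : Int) (h : ¬ max 0 (k - c) ≥ min total (k + c + 1)) :
    sbMerge c total [] k = [(max 0 (k - c), min total (k + c + 1))] := by
  rw [sbMerge.eq_def]; dsimp only; rw [if_neg h]

theorem sbMerge_cons (c total k ps pe : Int) (rest : List (Int × Int)) (h : ¬ max 0 (k - c) ≥ min total (k + c + 1)) :
    sbMerge c total ((ps, pe) :: rest) k =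
      (if max 0 (k - c) ≤ pe then (ps, max pe (min total (k + c + 1))) :: rest
       else (max 0 (k - c), min total (k + c + 1)) :: (ps, pe) :: rest) := by
  rw [sbMerge.eq_def]; dsimp only; rw [if_neg h]

theorem merge_step (c total k : Int) (m : List (Int × Int)) (h : sbMInv c total k m) :
    sbMInv c total (k + 1) (sbMerge c total m k) ∧
    (∀ i, i ∈ sbFlat (sbMerge c total m k) ↔ i ∈ sbFlat m ∨ sbCov c total k i) := by
  obtain ⟨hok, hub, hch⟩ := h
  by_cases hse : max 0 (k - c) ≥ min total (k + c + 1)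
  · rw [sbMerge_skip c total k m hse]
    refine ⟨minv_mono c total k (k+1) m ⟨hok, hub, hch⟩ (by omega), fun i => ?_⟩
    simp only [sbCov]
    constructor
    · exact Or.inl
    · rintro (hm | ⟨h1, h2⟩)
      · exact hm
      · omega
  · have hs0 : 0 ≤ max 0 (k - c) := by omega
    have het : min total (k + c + 1) ≤ total := by omega
    have hlt : max 0 (k - c) < min total (k + c + 1) := by omega
    cases m with
    | nil =>
      rw [sbMerge_nil c total k hse]
      refine ⟨⟨?_, ?_, ?_⟩, fun i => ?_⟩
      · intro p hp
        rw [List.mem_singleton] at hp; subst hp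
        exact ⟨hs0, hlt, het⟩
      · intro p hp
        rw [List.mem_singleton] at hp; subst hp
        simp; omega
      · simp
      · simp [mem_flat, sbCov]
    | cons hd rest =>
      obtain ⟨ps, pe⟩ := hd
      rw [sbMerge_cons c total k ps pe rest hse]
      have hps : ps ≤ max 0 (k - c) := hub (ps, pe) List.mem_cons_self
      have hpsok := hok (ps, pe) List.mem_cons_self
      simp only at hpsok
      by_cases hmg : max 0 (k - c) ≤ pe
      · rw [if_pos hmg]
        refine ⟨⟨?_, ?_, ?_⟩, fun i => ?_⟩
        · rintro p hp
          rw [List.mem_cons] at hp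
          rcases hp with rfl | hp
          · exact ⟨hpsok.1, by simp; omega, by simp; omega⟩
          · exact hok p (List.mem_cons_of_mem _ hp)
        · rintro p hp
          rw [List.mem_cons] at hp
          rcases hp with rfl | hp
          · simp; omega
          · have := hub p (List.mem_cons_of_mem _ hp); omega
        · cases rest with
          | nil => simp
          | cons r rr =>
            rw [List.isChain_cons_cons] at hch ⊢
            exact ⟨hch.1, hch.2⟩
        · simp only [mem_flat, List.mem_cons, sbCov]
          constructor
          · rintro ⟨p, (rfl | hp), h1, h2⟩
            · simp only at h1 h2
              by_cases hip : i < pe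
              · exact Or.inl ⟨(ps, pe), Or.inl rfl, h1, hip⟩
              · right; constructor <;> omega
            · exact Or.inl ⟨p, Or.inr hp, h1, h2⟩
          · rintro (⟨p, (rfl | hp), h1, h2⟩ | ⟨h1, h2⟩)
            · exact ⟨(ps, max pe (min total (k + c + 1))), Or.inl rfl, h1, by simp only at h2 ⊢; omega⟩
            · exact ⟨p, Or.inr hp, h1, h2⟩
            · exact ⟨(ps, max pe (min total (k + c + 1))), Or.inl rfl, by simp only; omega, by simp only; omega⟩
      · rw [if_neg hmg]
        refine ⟨⟨?_, ?_, ?_⟩, fun i => ?_⟩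
        · rintro p hp
          rw [List.mem_cons] at hp
          rcases hp with rfl | hp
          · exact ⟨hs0, hlt, het⟩
          · exact hok p hp
        · rintro p hp
          rw [List.mem_cons] at hp
          rcases hp with rfl | hp
          · simp; omega
          · have := hub p hp; omega
        · rw [List.isChain_cons_cons]
          exact ⟨by simp only; omega, hch⟩
        · simp only [mem_flat, List.mem_cons, sbCov]
          constructor
          · rintro ⟨p, (rfl | hp), h1, h2⟩
            · right; exact ⟨h1, h2⟩
            · exact Or.inl ⟨p, hp, h1, h2⟩
          · rintro (⟨p, hp, h1, h2⟩ | ⟨h1, h2⟩)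
            · exact ⟨p, Or.inr hp, h1, h2⟩
            · exact ⟨(max 0 (k - c), min total (k + c + 1)), Or.inl rfl, h1, h2⟩

theorem merge_fold (kws : List String) (c total : Int) (ls : List String) : ∀ (k : Int) (m : List (Int × Int)), sbMInv c total k m →
    sbMInv c total (k + ls.length) ((PySem.List.enumerate ls k).foldl (fun m p =>
        if sbQ kws p.2 then sbMerge c total m p.1 else m) m) ∧
    (∀ i, i ∈ sbFlat ((PySem.List.enumerate ls k).foldl (fun m p =>
        if sbQ kws p.2 then sbMerge c total m p.1 else m) m) ↔
      i ∈ sbFlat m ∨ ∃ p ∈ PySem.List.enumerate ls k, sbQ kws p.2 = true ∧ sbCov c total p.1 i) := by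
  induction ls with
  | nil => intro k m h; simpa [PySem.List.enumerate] using h
  | cons x t ih =>
    intro k m h
    have he : PySem.List.enumerate (x :: t) k = (k, x) :: PySem.List.enumerate t (k+1) := by
      simp [PySem.List.enumerate]
    rw [he]
    simp only [List.foldl_cons]
    set m1 := (if sbQ kws (k, x).2 then sbMerge c total m (k, x).1 else m) with hm1
    have step : sbMInv c total (k + 1) m1 ∧
        (∀ i, i ∈ sbFlat m1 ↔ i ∈ sbFlat m ∨ (sbQ kws x = true ∧ sbCov c total k i)) := by
      rw [hm1]
      by_cases hq : sbQ kws x = true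
      · simp only [hq, if_true]
        obtain ⟨h1, h2⟩ := merge_step c total k m h
        exact ⟨h1, fun i => by rw [h2 i]; tauto⟩
      · simp only [hq]
        refine ⟨minv_mono c total k (k+1) m h (by omega), fun i => ?_⟩
        simp only [Bool.false_eq_true] at hq ⊢
        tauto
    obtain ⟨hinv1, hmem1⟩ := step
    obtain ⟨hinv2, hmem2⟩ := ih (k + 1) m1 hinv1
    constructor
    · have : k + 1 + (t.length : Int) = k + ((x :: t).length : Int) := by simp; omega
      rw [← this]; exact hinv2
    · intro i
      rw [hmem2 i, hmem1 i]
      simp only [List.mem_cons]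
      constructor
      · rintro ((hm | ⟨hq, hcov⟩) | ⟨p, hp, hq, hcov⟩)
        · exact Or.inl hm
        · exact Or.inr ⟨(k, x), Or.inl rfl, hq, hcov⟩
        · exact Or.inr ⟨p, Or.inr hp, hq, hcov⟩
      · rintro (hm | ⟨p, (rfl | hp), hq, hcov⟩)
        · exact Or.inl (Or.inl hm)
        · exact Or.inl (Or.inr ⟨hq, hcov⟩)
        · exact Or.inr ⟨p, hp, hq, hcov⟩

theorem flat_lb (total : Int) : ∀ (M : List (Int × Int)) (lb : Int), sbOK total M →
    M.IsChain (fun a b => a.2 < b.1) → (∀ p, M.head? = some p → lb ≤ p.1) →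
    ∀ y ∈ sbFlat M, lb ≤ y := by
  intro M
  induction M with
  | nil => simp [sbFlat]
  | cons p rest ih =>
    intro lb hok hch hhd y hy
    rw [mem_flat] at hy
    obtain ⟨q, hq, h1, h2⟩ := hy
    rcases List.mem_cons.mp hq with rfl | hq
    · exact le_trans (hhd q rfl) h1
    · refine ih lb (fun r hr => hok r (List.mem_cons_of_mem _ hr)) ?_ ?_ y ((mem_flat rest y).mpr ⟨q, hq, h1, h2⟩)
      · cases rest with
        | nil => simp
        | cons r rr => exact (List.isChain_cons_cons.mp hch).2
      · intro r hr
        cases rest with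
        | nil => simp at hr
        | cons r0 rr =>
          rw [List.head?_cons] at hr
          injection hr with hr; subst hr
          have hpo := hok p List.mem_cons_self
          have := (List.isChain_cons_cons.mp hch).1
          have := hhd p rfl
          omega

theorem flat_pairwise (total : Int) : ∀ (M : List (Int × Int)), sbOK total M →
    M.IsChain (fun a b => a.2 < b.1) → List.Pairwise (· < ·) (sbFlat M) := by
  intro M
  induction M with
  | nil => simp [sbFlat]
  | cons p rest ih =>
    intro hok hch
    have hfl : sbFlat (p :: rest) = PySem.List.pyRange p.1 p.2 1 ++ sbFlat rest := by
      simp [sbFlat]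
    rw [hfl, List.pairwise_append]
    refine ⟨PySem.List.pairwise_lt_pyRange_one p.1 p.2, ?_, ?_⟩
    · apply ih (fun r hr => hok r (List.mem_cons_of_mem _ hr))
      cases rest with
      | nil => simp
      | cons r rr => exact (List.isChain_cons_cons.mp hch).2
    · intro x hx y hy
      have hx2 : x < p.2 := by
        rw [PySem.List.mem_pyRange_one] at hx; exact hx.2
      have : p.2 + 1 ≤ y := by
        refine flat_lb total rest (p.2 + 1) (fun r hr => hok r (List.mem_cons_of_mem _ hr)) ?_ ?_ y hy
        · cases rest with
          | nil => simp
          | cons r rr => exact (List.isChain_cons_cons.mp hch).2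
        · intro r hr
          cases rest with
          | nil => simp at hr
          | cons r0 rr =>
            rw [List.head?_cons] at hr
            injection hr with hr; subst hr
            have := (List.isChain_cons_cons.mp hch).1
            omega
      omega

theorem sliceRange (lines : List String) (s e : Int) (hs : 0 ≤ s) (he0 : 0 ≤ e) (he : e ≤ (lines.length : Int)) :
    PySem.List.slice lines (some s) (some e) =
      (PySem.List.pyRange s e 1).map (fun i => PySem.List.pyGetD lines i "") := by
  by_cases hse : e ≤ s
  · rw [PySem.List.pyRange_one_eq_nil hse, List.map_nil,
      PySem.List.slice_toNat lines hs he0]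
    have : e.toNat - s.toNat = 0 := by omega
    simp [this]
  · have hse : s < e := by omega
    rw [PySem.List.slice_toNat lines hs he0]
    apply List.ext_getElem
    · simp [PySem.List.length_pyRange_one]; omega
    · intro k h1 h2
      have hk : k < (e - s).toNat := by
        simpa [PySem.List.length_pyRange_one] using h2
      have hklen : s.toNat + k < lines.length := by omega
      rw [List.getElem_take, List.getElem_drop]
      rw [List.getElem_map, PySem.List.getElem_pyRange_one]
      have : s + (k : Int) = ((s.toNat + k : Nat) : Int) := by omega
      rw [this, PySem.List.pyGetD_natCast]
      simp [List.getD, List.getElem?_eq_getElem hklen]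

theorem rangeFoldA (lines : List String) : ∀ (n : Nat) (a : Int) (ch : List String),
    (PySem.List.pyRange a (a + ((n : Int) + 1)) 1).foldl (sbStepA lines) (ch, a - 1) =
      (ch ++ (PySem.List.pyRange a (a + ((n : Int) + 1)) 1).map (fun i => PySem.List.pyGetD lines i ""),
        a + n) := by
  intro n
  induction n with
  | zero =>
    intro a ch
    simp only [Nat.cast_zero, zero_add, add_zero]
    rw [PySem.List.pyRange_one_singleton a]
    simp [sbStepA]
  | succ n ih =>
    intro a ch
    have hcons : PySem.List.pyRange a (a + ((n + 1 : Nat) : Int) + 1) 1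
        = a :: PySem.List.pyRange (a + 1) (a + ((n + 1 : Nat) : Int) + 1) 1 :=
      PySem.List.pyRange_one_cons (by push_cast; omega)
    have harg : a + (((n + 1 : Nat) : Int) + 1) = a + ((n + 1 : Nat) : Int) + 1 := by ring
    rw [harg, hcons]
    simp only [List.foldl_cons]
    have hstep : sbStepA lines (ch, a - 1) a = (ch ++ [PySem.List.pyGetD lines a ""], a) := by
      simp [sbStepA]
    rw [hstep]
    have harg2 : a + ((n + 1 : Nat) : Int) + 1 = (a + 1) + ((n : Int) + 1) := by push_cast; ring
    rw [harg2]
    have := ih (a + 1) (ch ++ [PySem.List.pyGetD lines a ""])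
    have ha1 : a + 1 - 1 = a := by ring
    rw [ha1] at this
    rw [this]
    rw [Prod.mk.injEq]
    constructor
    · simp
    · push_cast; ring

theorem intervalFoldA (lines : List String) (s e : Int) (hse : s < e) (ch : List String) (pe : Int) :
    (PySem.List.pyRange s e 1).foldl (sbStepA lines) (ch, pe) =
      ((if pe ≥ 0 ∧ s > pe + 1 then ch ++ ["..."] else ch) ++
        (PySem.List.pyRange s e 1).map (fun i => PySem.List.pyGetD lines i ""), e - 1) := by
  rw [PySem.List.pyRange_one_cons hse]
  simp only [List.foldl_cons]
  have hstep : sbStepA lines (ch, pe) s =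
      ((if pe ≥ 0 ∧ s > pe + 1 then ch ++ ["..."] else ch) ++ [PySem.List.pyGetD lines s ""], s) := by
    simp [sbStepA]
  rw [hstep]
  set ch1 := (if pe ≥ 0 ∧ s > pe + 1 then ch ++ ["..."] else ch) with hch1
  by_cases hee : s + 1 = e
  · rw [← hee]
    rw [PySem.List.pyRange_one_eq_nil (le_refl (s+1))]
    simp
  · have hn : e = (s + 1) + (((e - s - 2).toNat : Int) + 1) := by omega
    rw [hn]
    have := rangeFoldA lines (e - s - 2).toNat (s + 1) (ch1 ++ [PySem.List.pyGetD lines s ""])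
    have hs1 : s + 1 - 1 = s := by ring
    rw [hs1] at this
    rw [this, Prod.mk.injEq]
    constructor
    · simp
    · omega

theorem chunks_eq (lines : List String) : ∀ (M : List (Int × Int)) (ch : List String) (pe : Int),
    sbOK (lines.length : Int) M → M.IsChain (fun a b => a.2 < b.1) →
    (∀ p, M.head? = some p → ((pe ≥ 0 ∧ p.1 > pe + 1) ↔ ch ≠ [])) →
    ((sbFlat M).foldl (sbStepA lines) (ch, pe)).1 = M.foldl (sbStepB lines) ch := by
  intro M
  induction M with
  | nil => intro ch pe _ _ _; simp [sbFlat]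
  | cons p rest ih =>
    intro ch pe hok hch hhd
    have hpo := hok p List.mem_cons_self
    have hfl : sbFlat (p :: rest) = PySem.List.pyRange p.1 p.2 1 ++ sbFlat rest := by
      simp [sbFlat]
    rw [hfl, List.foldl_append, intervalFoldA lines p.1 p.2 hpo.2.1 ch pe]
    have hiff := hhd p rfl
    have hsep : (if pe ≥ 0 ∧ p.1 > pe + 1 then ch ++ ["..."] else ch)
        = (if ch ≠ [] then ch ++ ["..."] else ch) := if_congr hiff rfl rfl
    have hslice : PySem.List.slice lines (some p.1) (some p.2)
        = (PySem.List.pyRange p.1 p.2 1).map (fun i => PySem.List.pyGetD lines i "") :=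
      sliceRange lines p.1 p.2 hpo.1 (by omega) hpo.2.2
    have hstepB : sbStepB lines ch p
        = (if pe ≥ 0 ∧ p.1 > pe + 1 then ch ++ ["..."] else ch) ++
          (PySem.List.pyRange p.1 p.2 1).map (fun i => PySem.List.pyGetD lines i "") := by
      rw [sbStepB, hslice, hsep]
    simp only [List.foldl_cons]
    rw [← hstepB]
    apply ih
    · exact fun r hr => hok r (List.mem_cons_of_mem _ hr)
    · cases rest with
      | nil => simp
      | cons r rr => exact (List.isChain_cons_cons.mp hch).2
    · intro r hr
      cases rest with
      | nil => simp at hr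
      | cons r0 rr =>
        rw [List.head?_cons] at hr
        injection hr with hr; subst hr
        have hchh := (List.isChain_cons_cons.mp hch).1
        constructor
        · intro _
          rw [hstepB]
          intro hemp
          have hlen : ((if pe ≥ 0 ∧ p.1 > pe + 1 then ch ++ ["..."] else ch) ++
              (PySem.List.pyRange p.1 p.2 1).map (fun i => PySem.List.pyGetD lines i "")).length = 0 := by
            rw [hemp]; rfl
          simp only [List.length_append, List.length_map, PySem.List.length_pyRange_one] at hlen
          omega
        · intro _
          constructor
          · omega
          · omega

-- ===== VERDICT (by name: the statement is the Claim_ definition above) =====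
theorem search_bulletin_spec : Claim_equal_search_bulletin := by
  intro content keywords c _
  unfold Spec_search_bulletin search_bulletin search_bulletin_alt
  by_cases hc : content = ""
  · simp [hc]
  · by_cases hk : keywords = []
    · simp [hc, hk]
    · rw [if_neg (by tauto), if_neg hc, if_neg hk]
      dsimp only
      set lines := (PySem.Str.split? content "\n").getD [] with hlines
      set total := (lines.length : Int) with htotal
      -- B's fold function equals the sbQ-phrased one
      have hfoldfn : ((PySem.List.enumerate lines 0).foldl (fun m p =>
            if sbAnyKw (keywords.map PySem.Str.lower) p.2 then sbMerge c total m p.1 else m) [])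
          = ((PySem.List.enumerate lines 0).foldl (fun m p =>
            if sbQ keywords p.2 then sbMerge c total m p.1 else m) []) := by
        congr 1
        funext m p
        rw [sbAnyKw_eq]
      rw [hfoldfn]
      set m := ((PySem.List.enumerate lines 0).foldl (fun m p =>
            if sbQ keywords p.2 then sbMerge c total m p.1 else m) []) with hm
      have hinv0 : sbMInv c total 0 [] := by
        refine ⟨?_, ?_, ?_⟩ <;> simp [sbOK]
      obtain ⟨hinv, hmem⟩ := merge_fold keywords c total lines 0 [] hinv0
      rw [← hm] at hinv hmem
      obtain ⟨hok, hub, hchrev⟩ := hinv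
      set M := m.reverse with hM
      have hokM : sbOK total M := fun p hp => hok p (List.mem_reverse.mp hp)
      have hchM : M.IsChain (fun a b => a.2 < b.1) := by
        rw [hM, List.isChain_reverse]
        exact hchrev
      have hmemM : ∀ i, i ∈ sbFlat M ↔ i ∈ sbRelevant lines keywords c := by
        intro i
        have h1 : i ∈ sbFlat M ↔ i ∈ sbFlat m := by
          rw [mem_flat, mem_flat]
          constructor
          · rintro ⟨p, hp, h⟩; exact ⟨p, List.mem_reverse.mp hp, h⟩
          · rintro ⟨p, hp, h⟩; exact ⟨p, List.mem_reverse.mpr hp, h⟩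
        rw [h1, hmem i, mem_rel]
        simp [sbFlat, htotal]
      have hpw : List.Pairwise (· < ·) (sbFlat M) := flat_pairwise total M hokM hchM
      have hnd : (sbFlat M).Nodup := hpw.imp (fun h => ne_of_lt h)
      have hperm : (sbFlat M).Perm (sbRelevant lines keywords c) :=
        (List.perm_ext_iff_of_nodup hnd (nodup_rel lines keywords c)).mpr hmemM
      have hsorted : PySem.List.sorted (sbRelevant lines keywords c) (fun x => x) = sbFlat M :=
        PySem.List.sorted_eq_of_perm_of_pairwise_lt _ _ _ hperm hpw
      have hemptyiff : (sbRelevant lines keywords c = []) ↔ (M = []) := by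
        constructor
        · intro h
          cases hMc : M with
          | nil => rfl
          | cons p t =>
            exfalso
            have hp := hokM p (by rw [hMc]; exact List.mem_cons_self)
            have : p.1 ∈ sbFlat M := (mem_flat M p.1).mpr ⟨p, by rw [hMc]; exact List.mem_cons_self, le_refl _, hp.2.1⟩
            rw [hmemM p.1, h] at this
            simp at this
        · intro h
          have : sbFlat M = [] := by rw [h]; rfl
          rcases hrel : sbRelevant lines keywords c with _ | ⟨x, t⟩
          · rfl
          · exfalso
            have hx : x ∈ sbFlat M := by
              rw [hmemM x, hrel]; exact List.mem_cons_self
            rw [this] at hx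
            simp at hx
      by_cases hrel : sbRelevant lines keywords c = []
      · rw [if_pos hrel, if_pos (hemptyiff.mp hrel)]
      · rw [if_neg hrel, if_neg (fun h => hrel (hemptyiff.mpr h))]
        have hchunks : ((PySem.List.sorted (sbRelevant lines keywords c) (fun x => x)).foldl
              (sbStepA lines) ([], -1)).1 = M.foldl (sbStepB lines) [] := by
          rw [hsorted]
          apply chunks_eq lines M [] (-1) hokM hchM
          intro p _
          constructor
          · rintro ⟨h1, _⟩; omega
          · intro h; exact absurd rfl h
        rw [hchunks]
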